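-- pv_equiv track=rewrite | github.com/manuel-fischer/ProtocolDraw | draw_protocol.py | fix_amp
-- ===== SOURCE A (Python) =====
-- def fix_amp(s):
--     s2 = ""
--     backslash_count = 0
--     for c in s:
--         if c == '\\':
--             backslash_count ^= 1
--             s2 += c
--         elif c == '&' and not backslash_count:
--             s2 += "\\svgamp "
--         else:
--             backslash_count = 0
--             s2 += c
--     return s2
-- ===== SOURCE B (Python) =====
-- def fix_amp(s):
--     # escape-pair consumption: a backslash always takes the next char verbatim;
--     # a bare '&' becomes '\svgamp '
--     out = []
--     i = 0
--     n = len(s)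
--     while i < n:
--         c = s[i]
--         if c == '\\':
--             out.append(s[i:i + 2])
--             i += 2
--         elif c == '&':
--             out.append('\\svgamp ')
--             i += 1
--         else:
--             out.append(c)
--             i += 1
--     return ''.join(out)
-- ===== Notes on version B (the rewrite author's own statement) =====
-- stated objective: simpler
-- what changed: Replaces the per-character parity flag (backslash_count ^= 1) with an index loop that consumes a backslash together with its escaped character in one two-char step, so no state variable survives across iterations; output built in a list and joined once.
import Mathlib
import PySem

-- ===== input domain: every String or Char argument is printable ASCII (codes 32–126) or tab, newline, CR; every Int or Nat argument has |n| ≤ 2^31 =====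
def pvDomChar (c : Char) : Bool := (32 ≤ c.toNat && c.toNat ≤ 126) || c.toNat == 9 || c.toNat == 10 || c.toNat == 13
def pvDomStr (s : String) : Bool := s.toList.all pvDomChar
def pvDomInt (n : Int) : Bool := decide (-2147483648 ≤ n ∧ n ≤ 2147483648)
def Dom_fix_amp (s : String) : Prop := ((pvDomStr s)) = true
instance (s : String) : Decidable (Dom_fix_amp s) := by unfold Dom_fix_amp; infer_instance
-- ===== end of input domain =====

-- B replaces A's per-character parity state machine by a two-character
-- "escape-pair" scan (a backslash always consumes the next char verbatim); objective: simpler.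


-- ===== PORT A =====
-- A: loop over chars with accumulator string s2 and parity flag backslash_count ∈ {0,1}.
def fixStep (st : List Char × Int) (c : Char) : List Char × Int :=
  if c = '\\' then (st.1 ++ [c], Int.xor st.2 1)
  else if c = '&' ∧ st.2 = 0 then (st.1 ++ "\\svgamp ".toList, st.2)
  else (st.1 ++ [c], 0)

def fix_amp (s : String) : String :=
  String.ofList (s.toList.foldl fixStep ([], 0)).1

-- ===== PORT B =====
-- Source B's while-loop over index i (jumping by 2 after a backslash, s[i:i+2]) as
-- the obvious structural recursion on the remaining suffix.
def altGo : List Char → List Char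
  | [] => []
  | c :: rest =>
    if c = '\\' then (c :: rest).take 2 ++ altGo (rest.drop 1)
    else if c = '&' then "\\svgamp ".toList ++ altGo rest
    else c :: altGo rest
termination_by l => l.length
decreasing_by all_goals (simp only [List.length_drop, List.length_cons]; omega)

def fix_amp_alt (s : String) : String := String.ofList (altGo s.toList)

-- ===== PRECONDITION & SPEC =====
def Spec_fix_amp (s : String) (out : String) : Prop := out = fix_amp_alt s
instance (s : String) (out : String) : Decidable (Spec_fix_amp s out) := by unfold Spec_fix_amp; infer_instance

-- ===== CLAIM (what is proved, stated in full; the proofs are below) =====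
def Claim_equal_fix_amp : Prop := ∀ (s : String), Dom_fix_amp s → Spec_fix_amp s (fix_amp s)

-- ===== LEMMAS AND PROOFS =====

-- One step of A's fold from the "just saw an unescaped backslash" state: the
-- next character is always appended verbatim and the parity flag returns to 0.
lemma fixStep_one (acc : List Char) (c : Char) :
    fixStep (acc, 1) c = (acc ++ [c], 0) := by
  unfold fixStep
  by_cases h : c = '\\'
  · simp [h]; decide
  · by_cases h2 : c = '&' <;> simp [h, h2]

-- Main invariant: A's fold from parity 0 appends exactly B's translation of the suffix.
lemma main_inv : ∀ (n : Nat) (l : List Char) (acc : List Char), l.length ≤ n →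
    (List.foldl fixStep (acc, 0) l).1 = acc ++ altGo l := by
  intro n
  induction n with
  | zero =>
    intro l acc h
    have : l = [] := List.eq_nil_of_length_eq_zero (Nat.le_zero.mp h)
    subst this; simp [altGo]
  | succ n ih =>
    intro l acc h
    match l with
    | [] => simp [altGo]
    | c :: rest =>
      by_cases hc : c = '\\'
      · subst hc
        match rest with
        | [] =>
          simp [altGo, fixStep]
        | c2 :: t =>
          have hlen : t.length ≤ n := by simp at h; omega
          simp only [List.foldl_cons]
          rw [show fixStep (acc, (0:Int)) '\\' = (acc ++ ['\\'], 1) from by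
            simp [fixStep]; decide]
          rw [fixStep_one]
          rw [ih t _ hlen]
          simp [altGo]
      · by_cases h2 : c = '&'
        · subst h2
          have hlen : rest.length ≤ n := by simp at h; omega
          simp only [List.foldl_cons]
          rw [show fixStep (acc, (0:Int)) '&' = (acc ++ "\\svgamp ".toList, 0) by
            simp [fixStep]]
          rw [ih rest _ hlen]
          simp [altGo]
        · have hlen : rest.length ≤ n := by simp at h; omega
          simp only [List.foldl_cons]
          rw [show fixStep (acc, (0:Int)) c = (acc ++ [c], 0) by
            simp [fixStep, hc, h2]]
          rw [ih rest _ hlen]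
          simp [altGo, hc, h2]

-- ===== VERDICT (by name: the statement is the Claim_ definition above) =====
theorem fix_amp_spec : Claim_equal_fix_amp := by
  intro s _
  unfold Spec_fix_amp fix_amp fix_amp_alt
  rw [main_inv s.toList.length s.toList [] (le_refl _)]
  simp
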